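-- pv_equiv track=rewrite | github.com/nameisczy/gc6d-vggt-graspnet | utils/load_model.py | _is_raw_graspnet_baseline_weights
-- ===== SOURCE A (Python) =====
-- from typing import Any, Dict, List, Optional
--
-- def _is_raw_graspnet_baseline_weights(state: Dict[str, Any]) -> bool:
--     """
--     graspnet-baseline 保存的 GraspNet 权重：顶层为 view_estimator.* / grasp_generator.*，
--     无 PureGraspNetPipeline 的 grasp_net. 前缀。
--     """
--     if not state:
--         return False
--     keys = list(state.keys())
--     if any(k.startswith("grasp_net.") for k in keys):
--         return False
--     if any(k.startswith("view_estimator.") for k in keys):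
--         return True
--     if any(k.startswith("grasp_generator.") for k in keys):
--         return True
--     return False
-- ===== SOURCE B (Python) =====
-- from typing import Any, Dict, List, Optional
--
-- def _is_raw_graspnet_baseline_weights(state: Dict[str, Any]) -> bool:
--     # Parse each key into its top-level module name (text before the first '.'),
--     # collect those names in a set, then answer with three set-membership tests.
--     tops = set()
--     for k in state:
--         i = k.find(".")
--         if i >= 0:
--             tops.add(k[:i])
--     return "grasp_net" not in tops and ("view_estimator" in tops or "grasp_generator" in tops)
-- ===== Notes on version B (the rewrite author's own statement) =====
-- stated objective: alternative
-- what changed: Instead of prefix-testing every key against three fixed prefixes in an early-return chain of any()-scans, B parses each key into its top-level module name (the text before its first '.'), collects those names in a set in one loop, and decides by three set-membership lookups.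
import Mathlib
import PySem

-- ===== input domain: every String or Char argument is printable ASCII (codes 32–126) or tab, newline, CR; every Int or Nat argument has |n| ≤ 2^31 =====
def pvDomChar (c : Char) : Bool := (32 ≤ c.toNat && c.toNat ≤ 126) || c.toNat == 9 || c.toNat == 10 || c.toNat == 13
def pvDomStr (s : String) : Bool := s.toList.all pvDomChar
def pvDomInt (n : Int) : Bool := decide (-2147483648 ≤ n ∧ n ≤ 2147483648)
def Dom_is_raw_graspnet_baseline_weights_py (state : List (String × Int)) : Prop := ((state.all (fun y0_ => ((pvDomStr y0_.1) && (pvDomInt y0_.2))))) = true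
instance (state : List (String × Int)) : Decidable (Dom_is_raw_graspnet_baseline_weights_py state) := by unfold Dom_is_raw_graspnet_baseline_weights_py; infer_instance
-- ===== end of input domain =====

-- B replaces A's three any(startswith)-scans with parsing each key's top-level module name
-- (text before the first '.') into a set once, then answers with three set-membership tests
-- (alternative decomposition, same asymptotic cost).


-- ===== PORT A =====
-- Literal port of A: early returns become an if-chain over three any()-scans of the key list.
def is_raw_graspnet_baseline_weights_py (state : List (String × Int)) : Bool :=
  if state.isEmpty then false
  else
    let keys := PySem.List.dedup (state.map Prod.fst)   -- list(state.keys()): first occurrences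
    if keys.any (fun k => PySem.Str.startswith k "grasp_net.") then false
    else if keys.any (fun k => PySem.Str.startswith k "view_estimator.") then true
    else if keys.any (fun k => PySem.Str.startswith k "grasp_generator.") then true
    else false

-- ===== PORT B =====
-- Port of B: one loop collecting each key's top-level name k[:k.find('.')] (when a '.' exists)
-- into a set, then three membership tests.
def is_raw_graspnet_baseline_weights_py_alt (state : List (String × Int)) : Bool :=
  let tops : PySem.Set String := state.foldl
    (fun tops kv =>
      let i := PySem.Str.find kv.1 "."
      if 0 ≤ i then PySem.Set.add tops (PySem.Str.slice kv.1 none (some i)) else tops)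
    PySem.Set.empty
  (!PySem.Set.contains tops "grasp_net") &&
    (PySem.Set.contains tops "view_estimator" || PySem.Set.contains tops "grasp_generator")

-- ===== PRECONDITION & SPEC =====
def Spec_is_raw_graspnet_baseline_weights_py (state : List (String × Int)) (out : Bool) : Prop := out = is_raw_graspnet_baseline_weights_py_alt state
instance (state : List (String × Int)) (out : Bool) : Decidable (Spec_is_raw_graspnet_baseline_weights_py state out) := by unfold Spec_is_raw_graspnet_baseline_weights_py; infer_instance

-- ===== CLAIM (what is proved, stated in full; the proofs are below) =====
def Claim_equal_is_raw_graspnet_baseline_weights_py : Prop := ∀ (state : List (String × Int)), Dom_is_raw_graspnet_baseline_weights_py state → Spec_is_raw_graspnet_baseline_weights_py state (is_raw_graspnet_baseline_weights_py state)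

-- ===== LEMMAS AND PROOFS =====

-- Char-level core fact: for a target t that contains no '.', "the first '.' of cs exists and
-- the text before it equals t" is exactly "cs starts with t followed by '.'".
lemma pv_top_prefix_iff (t cs : List Char) (ht : '.' ∉ t) :
    (0 ≤ PySem.Chars.find cs ['.'] ∧ List.take (PySem.Chars.find cs ['.']).toNat cs = t)
    ↔ (t ++ ['.']) <+: cs := by
  constructor
  · rintro ⟨h0, hts⟩
    obtain ⟨hpre, -⟩ := PySem.Chars.find_spec h0
    obtain ⟨r, hr⟩ := hpre
    exact ⟨r, by
      conv_rhs => rw [← List.take_append_drop (PySem.Chars.find cs ['.']).toNat cs]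
      rw [hts, ← hr, List.append_assoc]⟩
  · rintro ⟨r, hr⟩
    have hcs : cs = t ++ ('.' :: r) := by rw [← hr]; simp
    have h0 : 0 ≤ PySem.Chars.find cs ['.'] := by
      rw [PySem.Chars.find_nonneg_iff]
      exact ⟨t, r, by rw [hcs]; simp⟩
    obtain ⟨hpre, hmin⟩ := PySem.Chars.find_spec h0
    have hle : (PySem.Chars.find cs ['.']).toNat ≤ t.length := by
      by_contra hgt
      exact hmin t.length (by omega) ⟨r, by rw [hcs]; simp⟩
    set n := (PySem.Chars.find cs ['.']).toNat with hn
    have heq : n = t.length := by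
      rcases Nat.lt_or_ge n t.length with hlt | hge
      · exfalso
        obtain ⟨w, hw⟩ := hpre
        have hhd : (List.drop n cs)[0]? = some '.' := by
          rw [← hw]; simp
        rw [List.getElem?_drop, Nat.add_zero] at hhd
        rw [hcs, List.getElem?_append_left hlt, List.getElem?_eq_getElem hlt] at hhd
        exact ht (by
          have ht' : t[n] = '.' := by simpa using hhd
          rw [← ht']; exact List.getElem_mem _)
      · omega
    refine ⟨h0, ?_⟩
    rw [heq, hcs, List.take_left]

lemma pv_any_dedup {α : Type} [DecidableEq α] (xs : List α) (p : α → Bool) :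
    (PySem.List.dedup xs).any p = xs.any p := by
  rw [Bool.eq_iff_iff]
  simp only [List.any_eq_true, PySem.List.mem_dedup]

-- B's set of top-level names, queried at a dot-free string t, is A's any-startswith scan for t ++ ".".
lemma pv_contains_tops (t q : String) (ht : '.' ∉ t.toList) (hq : q.toList = t.toList ++ ['.'])
    (state : List (String × Int)) :
    PySem.Set.contains
      (state.foldl
        (fun tops kv =>
          let i := PySem.Str.find kv.1 "."
          if 0 ≤ i then PySem.Set.add tops (PySem.Str.slice kv.1 none (some i)) else tops)
        PySem.Set.empty) t
    = state.any (fun kv => PySem.Str.startswith kv.1 q) := by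
  have hfold :
      (state.foldl
        (fun tops kv =>
          let i := PySem.Str.find kv.1 "."
          if 0 ≤ i then PySem.Set.add tops (PySem.Str.slice kv.1 none (some i)) else tops)
        PySem.Set.empty)
      = PySem.Set.ofList
          (((state.filter (fun kv => decide (0 ≤ PySem.Str.find kv.1 "."))).map
            (fun kv => PySem.Str.slice kv.1 none (some (PySem.Str.find kv.1 "."))))) := by
    rw [PySem.Set.ofList_eq_foldl, List.foldl_map,
        PySem.List.foldl_ite_eq_foldl_filter (p := fun kv : String × Int => 0 ≤ PySem.Str.find kv.1 ".")]
    rfl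
  rw [hfold, Bool.eq_iff_iff, PySem.Set.contains_iff, PySem.Set.mem_ofList,
      List.any_eq_true]
  simp only [List.mem_map, List.mem_filter, decide_eq_true_eq]
  constructor
  · rintro ⟨kv, ⟨hmem, h0⟩, hslice⟩
    refine ⟨kv, hmem, ?_⟩
    have h0' : 0 ≤ PySem.Chars.find kv.1.toList ['.'] := by simpa [PySem.Str.find] using h0
    have htake : List.take (PySem.Chars.find kv.1.toList ['.']).toNat kv.1.toList = t.toList := by
      have := congrArg String.toList hslice
      simpa [PySem.Str.slice, PySem.Str.find, PySem.List.slice_to _ h0'] using this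
    have := (pv_top_prefix_iff t.toList kv.1.toList ht).mp ⟨h0', htake⟩
    rw [PySem.Str.startswith_eq, PySem.Chars.startswith_iff, hq]
    exact this
  · rintro ⟨kv, hmem, hsw⟩
    have hpre : (t.toList ++ ['.']) <+: kv.1.toList := by
      rw [PySem.Str.startswith_eq, PySem.Chars.startswith_iff, hq] at hsw
      exact hsw
    obtain ⟨h0', htake⟩ := (pv_top_prefix_iff t.toList kv.1.toList ht).mpr hpre
    refine ⟨kv, ⟨hmem, by simpa [PySem.Str.find] using h0'⟩, ?_⟩
    apply String.toList_injective
    simpa [PySem.Str.slice, PySem.Str.find, PySem.List.slice_to _ h0'] using htake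

-- ===== VERDICT (by name: the statement is the Claim_ definition above) =====
theorem is_raw_graspnet_baseline_weights_py_spec : Claim_equal_is_raw_graspnet_baseline_weights_py := by
  intro state _
  show is_raw_graspnet_baseline_weights_py state = is_raw_graspnet_baseline_weights_py_alt state
  unfold is_raw_graspnet_baseline_weights_py is_raw_graspnet_baseline_weights_py_alt
  simp only [pv_contains_tops "grasp_net" "grasp_net." (by decide) (by decide),
      pv_contains_tops "view_estimator" "view_estimator." (by decide) (by decide),
      pv_contains_tops "grasp_generator" "grasp_generator." (by decide) (by decide),
      pv_any_dedup, List.any_map, Function.comp_def]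
  cases h1 : state.any (fun kv => PySem.Str.startswith kv.1 "grasp_net.") <;>
  cases h2 : state.any (fun kv => PySem.Str.startswith kv.1 "view_estimator.") <;>
  cases h3 : state.any (fun kv => PySem.Str.startswith kv.1 "grasp_generator.") <;>
  simp_all [List.any_eq_true, List.isEmpty_iff] <;>
  (rintro rfl; simp_all)
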